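-- pv_equiv track=rewrite | github.com/yuna1212/algorithm | 프로그래머스/PCCP 모의고사 1회/외톨이 알파벳.py | solution
-- ===== SOURCE A (Python) =====
-- def solution(input_string):
--     answer = ''
--     appeared_counter = dict()
--     previous = input_string[0]
--     appeared_counter[previous] = 1
--     for i in range(1, len(input_string)):
--         now = input_string[i]
--         if(previous == now): continue
--
--         previous = now
--
--         if now in appeared_counter:
--             if appeared_counter[now] == 1:
--                 appeared_counter[now] += 1
--             continue
--
--         appeared_counter[now] = 1
--
--     alone_alphabets = list(filter(lambda k: appeared_counter[k] > 1, appeared_counter.keys()))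
--     if(alone_alphabets):
--         alone_alphabets.sort()
--         return ''.join(alone_alphabets)
--     return 'N'
-- ===== SOURCE B (Python) =====
-- def solution(input_string):
--     stats = {}
--     for i, c in enumerate(input_string):
--         if c in stats:
--             f, _, n = stats[c]
--             stats[c] = (f, i, n + 1)
--         else:
--             stats[c] = (i, i, 1)
--     alone = sorted(c for c, (f, l, n) in stats.items() if l - f + 1 != n)
--     return ''.join(alone) if alone else 'N'
-- ===== Notes on version B (the rewrite author's own statement) =====
-- stated objective: alternative
-- what changed: Replaces A's run-collapsing pass (tracking the previous character and a capped per-letter group counter) with a single pass over enumerate that records each letter's first index, last index and occurrence count, then flags a letter as multi-group by the span/gap test last-first+1 != count.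
import Mathlib
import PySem

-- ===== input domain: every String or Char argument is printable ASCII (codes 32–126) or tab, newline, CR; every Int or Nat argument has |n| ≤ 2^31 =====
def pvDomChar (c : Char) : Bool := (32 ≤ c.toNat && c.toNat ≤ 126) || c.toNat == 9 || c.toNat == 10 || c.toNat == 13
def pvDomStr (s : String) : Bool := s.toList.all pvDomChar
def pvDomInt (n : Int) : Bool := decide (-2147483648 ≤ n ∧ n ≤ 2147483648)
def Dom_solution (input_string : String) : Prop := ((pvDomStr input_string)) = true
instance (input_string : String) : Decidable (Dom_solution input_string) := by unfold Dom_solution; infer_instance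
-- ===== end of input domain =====

-- B replaces A's run-collapsing group counter with one pass recording each letter's
-- (first index, last index, count) and the span/gap test last-first+1 != count (objective: alternative).

-- ===== PORT A =====
-- loop body of A's `for i in range(1, len(input_string))`: state = (previous, appeared_counter);
-- the loop reads input_string[i] for i = 1..len-1, i.e. exactly the characters of the tail in order.
def stepA (st : Char × PySem.Dict Char Int) (now : Char) : Char × PySem.Dict Char Int :=
  if st.1 == now then st
  else
    match st.2.get? now with
    | some v => if v == 1 then (now, st.2.insert now (v + 1)) else (now, st.2)
    | none => (now, st.2.insert now 1)

def solution (input_string : String) : String :=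
  match input_string.toList with
  | [] => ""  -- Python raises IndexError on input_string[0] here; excluded by Pre_solution
  | p :: rest =>
    let st := rest.foldl stepA (p, (PySem.Dict.empty).insert p 1)
    let d := st.2
    -- filter(lambda k: appeared_counter[k] > 1, appeared_counter.keys()): k is always a key, so the
    -- lookup appeared_counter[k] never raises and equals getD k 0
    let alone := d.keys.filter (fun k => decide (1 < d.getD k 0))
    if alone ≠ [] then String.ofList (PySem.List.sorted alone (fun x => x) false) else "N"

-- ===== PORT B =====
-- loop body of B's `for i, c in enumerate(input_string)`: stats maps c to (first, last, count)
def stepB (d : PySem.Dict Char (Int × Int × Int)) (ic : Int × Char) : PySem.Dict Char (Int × Int × Int) :=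
  match d.get? ic.2 with
  | some (f, _, n) => d.insert ic.2 (f, ic.1, n + 1)
  | none => d.insert ic.2 (ic.1, ic.1, 1)

def solution_alt (input_string : String) : String :=
  let stats := (PySem.List.enumerate input_string.toList 0).foldl stepB PySem.Dict.empty
  let alone := PySem.List.sorted
      ((stats.items.filter (fun q => decide (q.2.2.1 - q.2.1 + 1 ≠ q.2.2.2))).map Prod.fst)
      (fun x => x) false
  if alone ≠ [] then String.ofList alone else "N"

-- ===== PRECONDITION & SPEC =====
-- Pre_ excludes only the empty string, on which A raises IndexError (input_string[0]);
-- B returns "N" there.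
def Pre_solution (input_string : String) : Prop := input_string ≠ ""
instance (input_string : String) : Decidable (Pre_solution input_string) := by
  unfold Pre_solution; infer_instance
def pvWitness_solution : String := "ab"

def Spec_solution (input_string : String) (out : String) : Prop := out = solution_alt input_string
instance (input_string : String) (out : String) : Decidable (Spec_solution input_string out) := by
  unfold Spec_solution; infer_instance

-- ===== CLAIM (what is proved, stated in full; the proofs are below) =====
def Claim_equal_solution : Prop := ∀ (input_string : String), Dom_solution input_string → Pre_solution input_string → Spec_solution input_string (solution input_string)

-- ===== LEMMAS AND PROOFS =====

-- Invariant tying A's (previous, counter) state to B's stats after both have consumed the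
-- same prefix, of length i ≥ 1: the dicts have the same keys (both insert a letter at its
-- first occurrence), B's entry (f, la, n) records first index, last index and count of the
-- letter so far, and A's counter holds 1 if the letter's occurrences so far form one
-- contiguous block (la - f + 1 = n) and 2 otherwise.
def LoopInv (i : Int) (prev : Char) (d : PySem.Dict Char Int)
    (st : PySem.Dict Char (Int × Int × Int)) : Prop :=
  1 ≤ i ∧ d.keys = st.keys ∧ st.keys.Nodup ∧ st.contains prev = true ∧
  (∀ c, d.get? c = none ↔ st.get? c = none) ∧
  (∀ c f la n, st.get? c = some (f, la, n) →
    0 ≤ f ∧ f ≤ la ∧ la ≤ i - 1 ∧ 1 ≤ n ∧ n ≤ la - f + 1 ∧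
    (la = i - 1 ↔ c = prev) ∧ d.get? c = some (if la - f + 1 = n then 1 else 2))

lemma triple_eq {f la n f' la' n' : Int}
    (h : (some (f, la, n) : Option (Int × Int × Int)) = some (f', la', n')) :
    f = f' ∧ la = la' ∧ n = n' := by
  have h1 := Option.some.inj h
  exact ⟨congrArg Prod.fst h1,
    congrArg (Prod.fst ∘ Prod.snd) h1, congrArg (Prod.snd ∘ Prod.snd) h1⟩

lemma inv_step (i : Int) (prev now : Char) (d : PySem.Dict Char Int)
    (st : PySem.Dict Char (Int × Int × Int)) (h : LoopInv i prev d st) :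
    (stepA (prev, d) now).1 = now ∧
    LoopInv (i + 1) now (stepA (prev, d) now).2 (stepB st (i, now)) := by
  obtain ⟨hi, hkeys, hnd, hprev, hnone, hval⟩ := h
  by_cases hpn : prev = now
  · -- previous == now: A skips; B extends now's current block
    subst hpn
    have hc : st.contains prev = true := hprev
    rw [PySem.Dict.contains_eq_isSome_get?] at hc
    cases hget : st.get? prev with
    | none => rw [hget] at hc; simp at hc
    | some v =>
      obtain ⟨f, la, n⟩ := v
      obtain ⟨h0f, hfla, hlai, h1n, hnle, hlaiff, hdg⟩ := hval _ _ _ _ hget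
      have hla : la = i - 1 := hlaiff.mpr rfl
      have hA : stepA (prev, d) prev = (prev, d) := by simp [stepA]
      have hB : stepB st (i, prev) = st.insert prev (f, i, n + 1) := by
        simp [stepB, hget]
      refine ⟨by simp [hA], by omega, ?_, ?_, ?_, ?_, ?_⟩
      · rw [hA, hB, PySem.Dict.keys_insert_of_contains _ _ hprev, hkeys]
      · rw [hB, PySem.Dict.keys_insert_of_contains _ _ hprev]; exact hnd
      · rw [hB]; exact PySem.Dict.contains_insert_self _ _ _
      · intro c
        rw [hA, hB, PySem.Dict.get?_insert]
        by_cases hcp : c = prev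
        · subst hcp; simp [hdg]
        · simp [hcp, hnone c]
      · intro c f' la' n' hc'
        rw [hB, PySem.Dict.get?_insert] at hc'
        rw [hA]
        by_cases hcp : c = prev
        · subst hcp
          rw [if_pos rfl] at hc'
          obtain ⟨rfl, rfl, rfl⟩ := triple_eq hc'
          refine ⟨h0f, by omega, by omega, by omega, by omega,
            ⟨fun _ => rfl, fun _ => by omega⟩, ?_⟩
          rw [hdg]
          by_cases hcnd : la - f + 1 = n
          · rw [if_pos hcnd, if_pos (by omega)]
          · rw [if_neg hcnd, if_neg (by omega)]
        · rw [if_neg hcp] at hc'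
          obtain ⟨a0, a1, a2, a3, a4, a5, a6⟩ := hval _ _ _ _ hc'
          exact ⟨a0, a1, by omega, a3, a4,
            ⟨fun hx => absurd hx (by omega), fun hx => absurd hx hcp⟩, a6⟩
  · -- previous != now
    have hbeq : (prev == now) = false := by simp [hpn]
    cases hsg : st.get? now with
    | none =>
      have hdgn : d.get? now = none := (hnone now).mpr hsg
      have hcontSt : st.contains now = false := by
        rw [PySem.Dict.contains_eq_isSome_get?, hsg]; rfl
      have hcontD : d.contains now = false := by
        rw [PySem.Dict.contains_eq_isSome_get?, hdgn]; rfl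
      have hA : stepA (prev, d) now = (now, d.insert now 1) := by
        simp [stepA, hbeq, hdgn]
      have hB : stepB st (i, now) = st.insert now (i, i, 1) := by
        simp [stepB, hsg]
      refine ⟨by simp [hA], by omega, ?_, ?_, ?_, ?_, ?_⟩
      · rw [hA, hB, PySem.Dict.keys_insert_of_not_contains _ _ hcontD,
            PySem.Dict.keys_insert_of_not_contains _ _ hcontSt, hkeys]
      · rw [hB]; exact PySem.Dict.nodup_keys_insert _ _ _ hnd
      · rw [hB]; exact PySem.Dict.contains_insert_self _ _ _
      · intro c
        rw [hA, hB]
        simp only [PySem.Dict.get?_insert]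
        by_cases hcn : c = now
        · simp [hcn]
        · simp [hcn, hnone c]
      · intro c f' la' n' hc'
        rw [hB, PySem.Dict.get?_insert] at hc'
        rw [hA]
        by_cases hcn : c = now
        · subst hcn
          rw [if_pos rfl] at hc'
          obtain ⟨rfl, rfl, rfl⟩ := triple_eq hc'
          refine ⟨by omega, le_refl _, by omega, le_refl _, by omega,
            ⟨fun _ => rfl, fun _ => by omega⟩, ?_⟩
          rw [PySem.Dict.get?_insert, if_pos rfl, if_pos (by omega)]
        · rw [if_neg hcn] at hc'
          obtain ⟨a0, a1, a2, a3, a4, a5, a6⟩ := hval _ _ _ _ hc'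
          refine ⟨a0, a1, by omega, a3, a4,
            ⟨fun hx => absurd hx (by omega), fun hx => absurd hx hcn⟩, ?_⟩
          rw [PySem.Dict.get?_insert, if_neg hcn]; exact a6
    | some v =>
      obtain ⟨f, la, n⟩ := v
      obtain ⟨h0f, hfla, hlai, h1n, hnle, hlaiff, hdg⟩ := hval _ _ _ _ hsg
      have hlane : la ≠ i - 1 := fun hx => hpn (hlaiff.mp hx).symm
      have hcontSt : st.contains now = true := by
        rw [PySem.Dict.contains_eq_isSome_get?, hsg]; rfl
      have hcontD : d.contains now = true := by
        rw [PySem.Dict.contains_eq_isSome_get?, hdg]; rfl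
      have hB : stepB st (i, now) = st.insert now (f, i, n + 1) := by
        simp [stepB, hsg]
      -- A's dict after the step: whether the stored count was 1 or 2, the entry at `now`
      -- is 2 and every other entry is unchanged.
      have hstep : stepA (prev, d) now =
          (now, if la - f + 1 = n then d.insert now 2 else d) := by
        by_cases hcnd : la - f + 1 = n <;> simp [stepA, hbeq, hdg, hcnd]
      have hA1 : (stepA (prev, d) now).1 = now := by rw [hstep]
      have hAget : ∀ c, (stepA (prev, d) now).2.get? c =
          if c = now then some 2 else d.get? c := by
        intro c
        rw [hstep]
        by_cases hcnd : la - f + 1 = n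
        · simp only [if_pos hcnd, PySem.Dict.get?_insert]
        · simp only [if_neg hcnd]
          by_cases hcn : c = now
          · rw [if_pos hcn, hcn, hdg, if_neg hcnd]
          · rw [if_neg hcn]
      have hAkeys : (stepA (prev, d) now).2.keys = d.keys := by
        rw [hstep]
        by_cases hcnd : la - f + 1 = n
        · rw [if_pos hcnd]; exact PySem.Dict.keys_insert_of_contains _ _ hcontD
        · rw [if_neg hcnd]
      refine ⟨hA1, by omega, ?_, ?_, ?_, ?_, ?_⟩
      · rw [hAkeys, hB, PySem.Dict.keys_insert_of_contains _ _ hcontSt, hkeys]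
      · rw [hB, PySem.Dict.keys_insert_of_contains _ _ hcontSt]; exact hnd
      · rw [hB]; exact PySem.Dict.contains_insert_self _ _ _
      · intro c
        rw [hAget c, hB, PySem.Dict.get?_insert]
        by_cases hcn : c = now
        · simp [hcn]
        · simp [hcn, hnone c]
      · intro c f' la' n' hc'
        rw [hB, PySem.Dict.get?_insert] at hc'
        rw [hAget c]
        by_cases hcn : c = now
        · subst hcn
          rw [if_pos rfl] at hc'
          obtain ⟨rfl, rfl, rfl⟩ := triple_eq hc'
          refine ⟨h0f, by omega, by omega, by omega, by omega,
            ⟨fun _ => rfl, fun _ => by omega⟩, ?_⟩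
          rw [if_pos rfl, if_neg (by omega)]
        · rw [if_neg hcn] at hc'
          obtain ⟨a0, a1, a2, a3, a4, a5, a6⟩ := hval _ _ _ _ hc'
          refine ⟨a0, a1, by omega, a3, a4,
            ⟨fun hx => absurd hx (by omega), fun hx => absurd hx hcn⟩, ?_⟩
          rw [if_neg hcn]; exact a6

lemma inv_fold (rest : List Char) : ∀ (i : Int) (prev : Char) (d : PySem.Dict Char Int)
    (st : PySem.Dict Char (Int × Int × Int)), LoopInv i prev d st →
    LoopInv (i + rest.length) (rest.foldl stepA (prev, d)).1 (rest.foldl stepA (prev, d)).2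
      ((PySem.List.enumerate rest i).foldl stepB st) := by
  induction rest with
  | nil => intro i prev d st h; simpa [PySem.List.enumerate] using h
  | cons x t ih =>
    intro i prev d st h
    obtain ⟨h1, h2⟩ := inv_step i prev x d st h
    have hpair : (x, (stepA (prev, d) x).2) = stepA (prev, d) x := by
      conv_rhs => rw [← Prod.mk.eta (p := stepA (prev, d) x)]
      rw [h1]
    rw [PySem.List.enumerate_cons]
    simp only [List.foldl_cons, List.length_cons]
    have := ih (i + 1) x (stepA (prev, d) x).2 (stepB st (i, x)) h2
    rw [hpair] at this
    have harith : i + ((t.length + 1 : Nat) : Int) = i + 1 + (t.length : Int) := by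
      push_cast; ring
    rw [harith]
    exact this

lemma inv_base (p : Char) :
    LoopInv 1 p ((PySem.Dict.empty).insert p (1 : Int))
      ((PySem.Dict.empty).insert p ((0 : Int), (0 : Int), (1 : Int))) := by
  refine ⟨le_refl _, ?_, ?_, PySem.Dict.contains_insert_self _ _ _, ?_, ?_⟩
  · rw [PySem.Dict.keys_insert_of_not_contains _ _ (PySem.Dict.contains_empty _),
        PySem.Dict.keys_insert_of_not_contains _ _ (PySem.Dict.contains_empty _)]
    rfl
  · exact PySem.Dict.nodup_keys_insert _ _ _ (PySem.Dict.nodup_keys_empty)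
  · intro c
    rw [PySem.Dict.get?_insert, PySem.Dict.get?_insert]
    by_cases hc : c = p <;> simp [hc, PySem.Dict.get?_empty]
  · intro c f la n hc
    rw [PySem.Dict.get?_insert] at hc
    by_cases hcp : c = p
    · rw [if_pos hcp] at hc
      obtain ⟨rfl, rfl, rfl⟩ := triple_eq hc
      refine ⟨le_refl _, le_refl _, by omega, le_refl _, by omega,
        ⟨fun _ => hcp, fun _ => by omega⟩, ?_⟩
      rw [PySem.Dict.get?_insert, if_pos hcp, if_pos (by omega)]
    · rw [if_neg hcp, PySem.Dict.get?_empty] at hc; exact absurd hc (by simp)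

lemma alone_eq (i : Int) (prev : Char) (d : PySem.Dict Char Int)
    (st : PySem.Dict Char (Int × Int × Int)) (h : LoopInv i prev d st) :
    d.keys.filter (fun k => decide (1 < d.getD k 0)) =
      (st.items.filter (fun q => decide (q.2.2.1 - q.2.1 + 1 ≠ q.2.2.2))).map Prod.fst := by
  obtain ⟨hi, hkeys, hnd, hprev, hnone, hval⟩ := h
  rw [PySem.Dict.items_eq_map_keys st hnd ((0 : Int), (0 : Int), (0 : Int))]
  rw [List.filter_map, List.map_map]
  have hfst : (Prod.fst ∘ fun k => (k, st.getD k ((0 : Int), (0 : Int), (0 : Int)))) =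
      (id : Char → Char) := rfl
  rw [hfst, List.map_id, hkeys]
  apply List.filter_congr
  intro k hk
  have hcont : st.contains k = true := (PySem.Dict.contains_iff_mem_keys _ _).mpr hk
  rw [PySem.Dict.contains_eq_isSome_get?] at hcont
  cases hget : st.get? k with
  | none => rw [hget] at hcont; simp at hcont
  | some v =>
    obtain ⟨f, la, n⟩ := v
    obtain ⟨h0f, hfla, hlai, h1n, hnle, hlaiff, hdg⟩ := hval _ _ _ _ hget
    have hgetD : st.getD k ((0 : Int), (0 : Int), (0 : Int)) = (f, la, n) := by
      have : st.getD k ((0 : Int), (0 : Int), (0 : Int)) =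
          (st.get? k).getD ((0 : Int), (0 : Int), (0 : Int)) := rfl
      rw [this, hget]; rfl
    have hdD : d.getD k 0 = if la - f + 1 = n then 1 else 2 := by
      have : d.getD k 0 = (d.get? k).getD 0 := rfl
      rw [this, hdg]; rfl
    simp only [Function.comp, hgetD, hdD]
    by_cases hcnd : la - f + 1 = n <;> simp [hcnd]

-- ===== VERDICT (by name: the statement is the Claim_ definition above) =====
theorem solution_spec : Claim_equal_solution := by
  unfold Claim_equal_solution
  intro s _ hpre
  unfold Spec_solution solution solution_alt
  cases hl : s.toList with
  | nil =>
    exfalso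
    apply hpre
    have h0 : s.toList = "".toList := hl
    exact String.toList_injective h0
  | cons p rest =>
    rw [PySem.List.enumerate_cons]
    simp only [List.foldl_cons, zero_add]
    have hB0 : stepB PySem.Dict.empty (0, p) =
        (PySem.Dict.empty).insert p ((0 : Int), (0 : Int), (1 : Int)) := by
      simp [stepB, PySem.Dict.get?_empty]
    rw [hB0]
    have hinv := inv_fold rest 1 p _ _ (inv_base p)
    have halone := alone_eq _ _ _ _ hinv
    rw [← halone]
    by_cases hL : ((rest.foldl stepA (p, (PySem.Dict.empty).insert p (1 : Int))).2.keys.filter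
        (fun k => decide (1 < (rest.foldl stepA (p, (PySem.Dict.empty).insert p (1 : Int))).2.getD k 0))) = []
    · simp [hL, PySem.List.sorted_eq_nil_iff]
    · simp [hL, PySem.List.sorted_eq_nil_iff]
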